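-- pv_equiv track=rewrite | github.com/spicy-biscuit/Sandbox | Python/AOC/2018/12-P2.py | Ensure
-- ===== SOURCE A (Python) =====
-- def Ensure(String):
--   Out = [0, 0]
--   while True:
--     if String[:5] != ".....":
--       String = "." + String
--       Out[0] += 1
--       continue
--     break
--   while True:
--     if String[-5:] != ".....":
--       String = String + "."
--       Out[1] += 1
--       continue
--     break
--   return([String] + Out)
-- ===== SOURCE B (Python) =====
-- def Ensure(String):
--     L = len(String) - len(String.lstrip('.'))
--     lead = max(0, 5 - L)
--     padded = '.' * lead + String
--     T = len(padded) - len(padded.rstrip('.'))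
--     trail = max(0, 5 - T)
--     return [padded + '.' * trail, lead, trail]
-- ===== Notes on version B (the rewrite author's own statement) =====
-- stated objective: simpler
-- what changed: Replaces A's two one-character-at-a-time while loops with direct counting of the leading/trailing dot-run lengths (lstrip/rstrip) and a single padded string build.
import Mathlib
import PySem

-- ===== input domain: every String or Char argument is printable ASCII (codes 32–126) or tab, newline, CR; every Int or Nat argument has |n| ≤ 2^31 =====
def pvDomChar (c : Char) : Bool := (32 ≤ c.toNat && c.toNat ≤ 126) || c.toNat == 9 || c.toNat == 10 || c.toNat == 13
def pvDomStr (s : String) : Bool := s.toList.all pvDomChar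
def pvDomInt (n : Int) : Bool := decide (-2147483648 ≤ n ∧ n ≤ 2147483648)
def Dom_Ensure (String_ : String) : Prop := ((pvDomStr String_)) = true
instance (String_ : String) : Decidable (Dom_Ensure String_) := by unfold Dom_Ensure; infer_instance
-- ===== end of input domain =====

-- B replaces A's two one-dot-at-a-time while loops by counting the leading/trailing
-- dot runs directly and padding once; objective: simpler. Both total, return value only.

-- ===== PORT A =====
-- A's leading while loop: prepend '.' while String[:5] != ".....".  The loop runs at
-- most 5 times (each step lengthens the leading dot run), so fuel 6 is exact.
def leadLoopA : Nat → List Char → Int → List Char × Int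
  | 0, s, c => (s, c)
  | f + 1, s, c =>
    if s.take 5 ≠ ['.', '.', '.', '.', '.'] then leadLoopA f ('.' :: s) (c + 1)
    else (s, c)

-- A's trailing while loop: append '.' while String[-5:] != ".....".  s.drop (s.length - 5)
-- is exactly Python s[-5:] (whole string when length < 5).  Fuel 6 is exact as above.
def trailLoopA : Nat → List Char → Int → List Char × Int
  | 0, s, c => (s, c)
  | f + 1, s, c =>
    if s.drop (s.length - 5) ≠ ['.', '.', '.', '.', '.'] then trailLoopA f (s ++ ['.']) (c + 1)
    else (s, c)

def Ensure (String_ : String) : String × Int × Int :=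
  let (s1, o0) := leadLoopA 6 String_.toList 0
  let (s2, o1) := trailLoopA 6 s1 0
  (String.ofList s2, o0, o1)

-- ===== PORT B =====
-- lstrip('.') = dropWhile, rstrip('.') = reverse ∘ dropWhile ∘ reverse; Nat subtraction
-- 5 - L is Python's max(0, 5 - L).
def Ensure_alt (String_ : String) : String × Int × Int :=
  let s := String_.toList
  let L : Nat := s.length - (s.dropWhile (fun c => c == '.')).length
  let lead : Nat := 5 - L
  let padded := List.replicate lead '.' ++ s
  let T : Nat := padded.length - ((padded.reverse.dropWhile (fun c => c == '.')).reverse).length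
  let trail : Nat := 5 - T
  (String.ofList (padded ++ List.replicate trail '.'), (lead : Int), (trail : Int))

-- ===== PRECONDITION & SPEC =====
def Spec_Ensure (String_ : String) (out : String × Int × Int) : Prop := out = Ensure_alt String_
instance (String_ : String) (out : String × Int × Int) : Decidable (Spec_Ensure String_ out) := by unfold Spec_Ensure; infer_instance

-- ===== CLAIM (what is proved, stated in full; the proofs are below) =====
def Claim_equal_Ensure : Prop := ∀ (String_ : String), Dom_Ensure String_ → Spec_Ensure String_ (Ensure String_)

-- ===== LEMMAS AND PROOFS =====

-- length of the leading dot run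
def dotRun (s : List Char) : Nat := (s.takeWhile (fun c => c == '.')).length

theorem dotRun_cons_dot (s : List Char) : dotRun ('.' :: s) = dotRun s + 1 := by
  simp [dotRun, List.takeWhile]

theorem take5_iff (s : List Char) :
    s.take 5 = ['.', '.', '.', '.', '.'] ↔ 5 ≤ dotRun s := by
  constructor
  · intro h
    match s with
    | a :: b :: c :: d :: e :: t =>
      simp [List.take] at h
      obtain ⟨ha, hb, hc, hd, he⟩ := h
      subst ha hb hc hd he
      simp [dotRun, List.takeWhile]
    | [] => simp [List.take] at h
    | [a] => simp [List.take] at h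
    | [a, b] => simp [List.take] at h
    | [a, b, c] => simp [List.take] at h
    | [a, b, c, d] => simp [List.take] at h
  · intro h
    have hlen : 5 ≤ (s.takeWhile (fun c => c == '.')).length := h
    have h1 : s.take 5 = (s.takeWhile (fun c => c == '.')).take 5 := by
      conv_lhs => rw [← List.takeWhile_append_dropWhile (p := fun c => c == '.') (l := s)]
      rw [List.take_append_of_le_length hlen]
    rw [h1]
    have h2 : (s.takeWhile (fun c => c == '.')).take 5 = List.replicate 5 '.' := by
      rw [List.eq_replicate_iff]
      refine ⟨by simp [List.length_take]; omega, ?_⟩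
      intro b hb
      have := List.mem_takeWhile_imp (List.mem_of_mem_take hb)
      simpa using this
    rw [h2]
    rfl

theorem leadLoopA_eq (f : Nat) (s : List Char) (c : Int)
    (hf : 5 - dotRun s ≤ f) :
    leadLoopA f s c = (List.replicate (5 - dotRun s) '.' ++ s, c + ((5 - dotRun s : Nat) : Int)) := by
  induction f generalizing s c with
  | zero =>
    have h0 : 5 - dotRun s = 0 := by omega
    simp [leadLoopA, h0]
  | succ f ih =>
    by_cases h : 5 ≤ dotRun s
    · have h0 : 5 - dotRun s = 0 := by omega
      simp [leadLoopA, (take5_iff s).2 h, h0]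
    · have hne : s.take 5 ≠ ['.', '.', '.', '.', '.'] := fun hc => h ((take5_iff s).1 hc)
      have hstep : dotRun ('.' :: s) = dotRun s + 1 := dotRun_cons_dot s
      have h1 : 5 - dotRun ('.' :: s) ≤ f := by omega
      have : leadLoopA (f + 1) s c = leadLoopA f ('.' :: s) (c + 1) := by
        simp [leadLoopA, hne]
      rw [this, ih _ _ h1, hstep]
      have hk : 5 - dotRun s = (5 - (dotRun s + 1)) + 1 := by omega
      rw [Prod.mk.injEq]
      refine ⟨?_, ?_⟩
      · rw [hk, List.replicate_succ', List.append_assoc]; rfl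
      · omega

-- trailing analogue: condition s[-5:] == "....." in terms of the trailing dot run
theorem drop5_iff (s : List Char) :
    s.drop (s.length - 5) = ['.', '.', '.', '.', '.'] ↔ 5 ≤ dotRun s.reverse := by
  have hrev : s.drop (s.length - 5) = (s.reverse.take 5).reverse := by
    rw [List.take_reverse, List.reverse_reverse]
  rw [hrev]
  constructor
  · intro h
    have : s.reverse.take 5 = ['.', '.', '.', '.', '.'] := by
      have := congrArg List.reverse h
      simpa using this
    exact (take5_iff _).1 this
  · intro h
    rw [(take5_iff _).2 h]
    rfl

theorem dotRun_append_dot (s : List Char) :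
    dotRun (s ++ ['.']).reverse = dotRun s.reverse + 1 := by
  rw [List.reverse_append]
  simpa using dotRun_cons_dot s.reverse

theorem trailLoopA_eq (f : Nat) (s : List Char) (c : Int)
    (hf : 5 - dotRun s.reverse ≤ f) :
    trailLoopA f s c =
      (s ++ List.replicate (5 - dotRun s.reverse) '.', c + ((5 - dotRun s.reverse : Nat) : Int)) := by
  induction f generalizing s c with
  | zero =>
    have h0 : 5 - dotRun s.reverse = 0 := by omega
    simp [trailLoopA, h0]
  | succ f ih =>
    by_cases h : 5 ≤ dotRun s.reverse
    · have h0 : 5 - dotRun s.reverse = 0 := by omega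
      simp [trailLoopA, (drop5_iff s).2 h, h0]
    · have hne : s.drop (s.length - 5) ≠ ['.', '.', '.', '.', '.'] :=
        fun hc => h ((drop5_iff s).1 hc)
      have hstep := dotRun_append_dot s
      have h1 : 5 - dotRun (s ++ ['.']).reverse ≤ f := by omega
      have : trailLoopA (f + 1) s c = trailLoopA f (s ++ ['.']) (c + 1) := by
        simp [trailLoopA, hne]
      rw [this, ih _ _ h1, hstep]
      have hk : 5 - dotRun s.reverse = (5 - (dotRun s.reverse + 1)) + 1 := by omega
      rw [Prod.mk.injEq]
      refine ⟨?_, ?_⟩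
      · rw [hk, List.replicate_succ, List.append_assoc]; rfl
      · omega

theorem length_sub_dropWhile (s : List Char) :
    s.length - (s.dropWhile (fun c => c == '.')).length = dotRun s := by
  have h : (s.takeWhile (fun c => c == '.')).length + (s.dropWhile (fun c => c == '.')).length
      = s.length := by
    rw [← List.length_append, List.takeWhile_append_dropWhile]
  unfold dotRun
  omega

-- ===== VERDICT (by name: the statement is the Claim_ definition above) =====
theorem Ensure_spec : Claim_equal_Ensure := by
  intro String_ _
  unfold Spec_Ensure Ensure Ensure_alt
  have hlead := leadLoopA_eq 6 String_.toList 0 (by omega)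
  have htrail := trailLoopA_eq 6
      (List.replicate (5 - dotRun String_.toList) '.' ++ String_.toList) 0 (by omega)
  simp only [hlead, htrail, length_sub_dropWhile, List.length_reverse]
  have hT := length_sub_dropWhile
      (List.replicate (5 - dotRun String_.toList) '.' ++ String_.toList).reverse
  rw [List.length_reverse] at hT
  simp only [hT]
  simp
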